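-- pv_equiv track=rewrite | github.com/sweepai/sweep | sweepai/agents/modify.py | get_surrounding_lines
-- ===== SOURCE A (Python) =====
-- def get_surrounding_lines(file_contents: str, best_match: str) -> tuple[str, str]:
--     best_match_index = file_contents.find(best_match)
--     NUM_LINES_SURROUNDING = 6
--     surrounding_lines_before = "\n"
--     surrounding_lines_after = ""
--     if best_match_index != -1:
--         # OPUS START - this is a hacky way to get the surrounding lines, doesn't handle inline \n
--         # Find the index of the fifth \n before the best_match_index
--         best_match_start = max(0, file_contents.rfind("\n", 0, best_match_index))
--         for _ in range(NUM_LINES_SURROUNDING - 1):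
--             best_match_start = max(0, file_contents.rfind("\n", 0, best_match_start))
--
--         # Find the index of the fifth \n after the best_match_index
--         best_match_end = best_match_index + len(best_match)
--         for _ in range(NUM_LINES_SURROUNDING * 2): # 2x the number of lines surrounding after for now
--             best_match_end = file_contents.find("\n", best_match_end + 1)
--             if best_match_end == -1:
--                 best_match_end = len(file_contents)
--                 break
--         # OPUS END
--         surrounding_lines_before = file_contents[best_match_start:best_match_index]
--         surrounding_lines_after = file_contents[best_match_index:best_match_end]
--     return surrounding_lines_before, surrounding_lines_after
-- ===== SOURCE B (Python) =====
-- def get_surrounding_lines(file_contents: str, best_match: str) -> tuple[str, str]: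
--     i = file_contents.find(best_match)
--     if i == -1:
--         return "\n", ""
--     start = i + len(best_match)
--     newlines = [k for k, ch in enumerate(file_contents) if ch == "\n"]
--     before = [k for k in newlines if k < i]
--     after = [k for k in newlines if k > start]
--     begin = before[-6] if len(before) >= 6 else 0
--     end = after[11] if len(after) >= 12 else len(file_contents)
--     return file_contents[begin:i], file_contents[i:end]
-- ===== Notes on version B (the rewrite author's own statement) =====
-- stated objective: idiomatic
-- what changed: A locates the 6th newline before and 12th newline after the match by 18 separate rfind/find scans with a break; B builds the list of newline indices once with a single enumerate pass and selects the required boundary indices from it, with the same clamping to 0 and len(file_contents).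
import Mathlib
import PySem

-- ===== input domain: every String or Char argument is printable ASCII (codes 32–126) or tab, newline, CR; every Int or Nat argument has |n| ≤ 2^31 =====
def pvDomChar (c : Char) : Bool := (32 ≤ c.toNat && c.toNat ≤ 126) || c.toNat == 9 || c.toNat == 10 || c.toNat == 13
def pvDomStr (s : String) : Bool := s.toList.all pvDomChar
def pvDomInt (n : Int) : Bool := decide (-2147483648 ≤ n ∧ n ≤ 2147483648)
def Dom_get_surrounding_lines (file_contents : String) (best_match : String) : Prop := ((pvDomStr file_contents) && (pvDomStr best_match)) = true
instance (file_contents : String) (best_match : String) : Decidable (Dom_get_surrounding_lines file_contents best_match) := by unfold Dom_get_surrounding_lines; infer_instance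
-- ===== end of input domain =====

-- B replaces A's 18 separate rfind/find scans by one enumerate pass collecting newline
-- indices and direct selection of the boundary indices (idiomatic; same O(n) cost).


-- ===== PORT A =====
-- the forward loop 'for _ in range(12): best_match_end = find("\n", best_match_end+1); if -1: end=len; break'
def pvAFindEnd (file_contents : String) (e : Int) : Nat → Int
  | 0 => e
  | k+1 =>
    let e' := PySem.Str.findFrom file_contents "\n" (e + 1) none
    if e' = -1 then PySem.Str.len file_contents else pvAFindEnd file_contents e' k

def get_surrounding_lines (file_contents : String) (best_match : String) : String × String :=
  let best_match_index := PySem.Str.find file_contents best_match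
  let surrounding_lines_before := "\n"
  let surrounding_lines_after := ""
  if best_match_index ≠ -1 then
    -- best_match_start = max(0, rfind("\n", 0, best_match_index)), then 5 more times
    let bms0 := max 0 (PySem.Str.rfindFrom file_contents "\n" 0 (some best_match_index))
    let best_match_start := (PySem.List.pyRange 0 5 1).foldl
      (fun acc _ => max 0 (PySem.Str.rfindFrom file_contents "\n" 0 (some acc))) bms0
    let best_match_end := pvAFindEnd file_contents (best_match_index + PySem.Str.len best_match) 12
    (PySem.Str.slice file_contents (some best_match_start) (some best_match_index),
     PySem.Str.slice file_contents (some best_match_index) (some best_match_end))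
  else
    (surrounding_lines_before, surrounding_lines_after)

-- ===== PORT B =====
def get_surrounding_lines_alt (file_contents : String) (best_match : String) : String × String :=
  let i := PySem.Str.find file_contents best_match
  if i = -1 then ("\n", "") else
    let start := i + PySem.Str.len best_match
    let newlines := ((PySem.List.enumerate file_contents.toList 0).filter
      (fun p => p.2 == '\n')).map (fun p => p.1)
    let before := newlines.filter (fun k => k < i)
    let after := newlines.filter (fun k => start < k)
    let begin_ := if 6 ≤ before.length then
        (match PySem.List.pyGet? before (-6) with | some v => v | none => 0) else 0
    let end_ := if 12 ≤ after.length then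
        (match PySem.List.pyGet? after (11 : Int) with | some v => v | none => 0)
      else PySem.Str.len file_contents
    (PySem.Str.slice file_contents (some begin_) (some i),
     PySem.Str.slice file_contents (some i) (some end_))

-- ===== PRECONDITION & SPEC =====
def Spec_get_surrounding_lines (file_contents : String) (best_match : String) (out : String × String) : Prop := out = get_surrounding_lines_alt file_contents best_match
instance (file_contents : String) (best_match : String) (out : String × String) : Decidable (Spec_get_surrounding_lines file_contents best_match out) := by unfold Spec_get_surrounding_lines; infer_instance

-- ===== CLAIM (what is proved, stated in full; the proofs are below) =====
def Claim_equal_get_surrounding_lines : Prop := ∀ (file_contents : String) (best_match : String), Dom_get_surrounding_lines file_contents best_match → Spec_get_surrounding_lines file_contents best_match (get_surrounding_lines file_contents best_match)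

-- ===== LEMMAS AND PROOFS =====

theorem singleton_isPrefixOf (c : Char) (t : List Char) :
    [c].isPrefixOf t = (t.head? == some c) := by
  cases t with
  | nil => rfl
  | cons h tl => simp [List.isPrefixOf, List.head?, BEq.comm]

theorem rgo_char (l : List Char) (c : Char) (x : Nat) :
    PySem.Chars.rfind.go l [c] x =
      (((List.range (x+1)).filter (fun j => l[j]? == some c)).getLast?).elim (-1) (fun j => (j : Int)) := by
  induction x with
  | zero =>
    simp only [PySem.Chars.rfind.go, singleton_isPrefixOf]
    by_cases h : l[0]? = some c <;> simp [h, List.head?_eq_getElem?]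
  | succ x ih =>
    rw [show PySem.Chars.rfind.go l [c] (x+1) =
      (if [c].isPrefixOf (l.drop (x+1)) then ((x+1 : Nat) : Int) else PySem.Chars.rfind.go l [c] x) from rfl]
    rw [singleton_isPrefixOf, List.head?_drop]
    rw [show (x+1+1) = (x+1)+1 from rfl, List.range_succ, List.filter_append]
    by_cases h : l[x+1]? = some c
    · simp [h]
    · simp [h, ih]

-- positions of '\n' (as Nats, ascending)
def pvNl (l : List Char) : List Nat := (List.range l.length).filter (fun j => l[j]? == some '\n')

theorem rfind_char (l : List Char) (c : Char) :
    PySem.Chars.rfind l [c] =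
      (((List.range l.length).filter (fun j => l[j]? == some c)).getLast?).elim (-1) (fun j => (j : Int)) := by
  show PySem.Chars.rfind.go l [c] l.length = _
  rw [rgo_char, List.range_succ, List.filter_append]
  simp

theorem fgo_char (l : List Char) (c : Char) (k : Nat) :
    PySem.Chars.find.go [c] l k =
      (((List.range l.length).filter (fun j => l[j]? == some c)).head?).elim (-1) (fun j => ((k + j : Nat) : Int)) := by
  induction l generalizing k with
  | nil => simp [PySem.Chars.find.go]
  | cons h t ih =>
    rw [show PySem.Chars.find.go [c] (h :: t) k =
      (if [c].isPrefixOf (h :: t) then (k : Int) else PySem.Chars.find.go [c] t (k+1)) from rfl]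
    rw [singleton_isPrefixOf]
    rw [show (h :: t).length = t.length + 1 from rfl, List.range_succ_eq_map, List.filter_cons,
      List.filter_map]
    have hps : ((fun j => ((h :: t)[j]? == some c)) ∘ Nat.succ) = (fun j => (t[j]? == some c)) := by
      funext j; simp [Function.comp]
    rw [hps]
    by_cases hc : h = c
    · simp [hc, List.head?]
    · have h0 : (((h :: t)[0]? == some c)) = false := by simp [hc]
      have hhc : (((h :: t).head? == some c)) = false := by simp [hc]
      rw [h0, hhc]
      simp only [Bool.false_eq_true, if_false]
      rw [List.head?_map, ih (k+1)]
      cases hh : (List.filter (fun j => t[j]? == some c) (List.range t.length)).head? with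
      | none => rfl
      | some v => simp [Option.elim]; omega

theorem enum_bridge (l : List Char) (s : Int) :
    ((PySem.List.enumerate l s).filter (fun p => p.2 == '\n')).map (fun p => p.1) =
      ((List.range l.length).filter (fun j => l[j]? == some '\n')).map (fun (j : Nat) => s + (j : Int)) := by
  induction l generalizing s with
  | nil => simp [PySem.List.enumerate]
  | cons h t ih =>
    rw [PySem.List.enumerate_cons, List.filter_cons]
    rw [show (h :: t).length = t.length + 1 from rfl, List.range_succ_eq_map, List.filter_cons,
      List.filter_map]
    have hps : ((fun j => ((h :: t)[j]? == some '\n')) ∘ Nat.succ) = (fun j => (t[j]? == some '\n')) := by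
      funext j; simp [Function.comp]
    rw [hps]
    by_cases hc : h = '\n'
    · have h1 : (((s, h) : Int × Char).2 == '\n') = true := by simp [hc]
      have h2 : (((h :: t)[0]? == some '\n')) = true := by simp [hc]
      rw [h1, h2]
      simp only [if_true, List.map_cons]
      rw [ih (s+1)]
      rw [List.map_map]
      congr 1
      · simp
      · congr 1
        funext j
        simp [Function.comp]; omega
    · have h1 : (((s, h) : Int × Char).2 == '\n') = false := by simp [hc]
      have h2 : (((h :: t)[0]? == some '\n')) = false := by simp [hc]
      rw [h1, h2]
      simp only [Bool.false_eq_true, if_false]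
      rw [ih (s+1), List.map_map]
      congr 1
      funext j
      simp [Function.comp]
      omega

theorem range_filter_lt (n m : Nat) (h : m ≤ n) :
    (List.range n).filter (fun j => decide (j < m)) = List.range m := by
  induction n with
  | zero => interval_cases m; simp
  | succ n ih =>
    by_cases hm : m ≤ n
    · rw [List.range_succ, List.filter_append, ih hm]
      have : ¬ (n < m) := by omega
      simp [this]
    · have hm1 : m = n + 1 := by omega
      subst hm1
      rw [List.filter_eq_self.mpr]
      intro a ha
      simp only [List.mem_range] at ha
      simpa using ha

theorem range_filter_ge (n d : Nat) (h : d ≤ n) :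
    (List.range n).filter (fun j => decide (d ≤ j)) = (List.range (n - d)).map (fun j => d + j) := by
  induction n with
  | zero => interval_cases d; simp
  | succ n ih =>
    by_cases hd : d ≤ n
    · rw [List.range_succ, List.filter_append, ih hd]
      have h1 : (n + 1) - d = (n - d) + 1 := by omega
      rw [h1, List.range_succ, List.map_append]
      have : d ≤ n := hd
      simp [this]
    · have hd1 : d = n + 1 := by omega
      subst hd1
      rw [List.filter_eq_nil_iff.mpr]
      · simp
      · intro a ha
        simp only [List.mem_range] at ha
        simp; omega

theorem sorted_filter_lt (l : List Nat) (hl : l.Pairwise (· < ·)) (t : Nat) (ht : t < l.length) :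
    l.filter (fun x => decide (x < l[t])) = l.take t := by
  induction l generalizing t with
  | nil => simp at ht
  | cons h tl ih =>
    rcases List.pairwise_cons.mp hl with ⟨hh, htl⟩
    cases t with
    | zero =>
      simp only [List.getElem_cons_zero, List.take_zero, List.filter_cons]
      simp only [Nat.lt_irrefl, decide_false, Bool.false_eq_true, if_false]
      rw [List.filter_eq_nil_iff]
      intro a ha
      simp only [decide_eq_true_eq, not_lt]
      exact le_of_lt (hh a ha)
    | succ t' =>
      simp only [List.getElem_cons_succ, List.filter_cons, List.take_succ_cons]
      have ht' : t' < tl.length := by simpa using ht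
      have : h < tl[t'] := hh _ (List.getElem_mem _)
      simp only [this, decide_true, if_true]
      exact congrArg (h :: ·) (ih htl t' ht')

theorem sorted_filter_gt (l : List Nat) (hl : l.Pairwise (· < ·)) (t : Nat) (ht : t < l.length) :
    l.filter (fun x => decide (l[t] < x)) = l.drop (t + 1) := by
  induction l generalizing t with
  | nil => simp at ht
  | cons h tl ih =>
    rcases List.pairwise_cons.mp hl with ⟨hh, htl⟩
    cases t with
    | zero =>
      simp only [List.getElem_cons_zero, List.drop_succ_cons, List.drop_zero, List.filter_cons]
      simp only [Nat.lt_irrefl, decide_false, Bool.false_eq_true, if_false]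
      rw [List.filter_eq_self]
      intro a ha; exact decide_eq_true (hh a ha)
    | succ t' =>
      simp only [List.getElem_cons_succ, List.filter_cons, List.drop_succ_cons]
      have ht' : t' < tl.length := by simpa using ht
      have : ¬ (tl[t'] < h) := not_lt.mpr (le_of_lt (hh _ (List.getElem_mem _)))
      simp only [this, decide_false, Bool.false_eq_true, if_false]
      exact ih htl t' ht'

theorem find_char (l : List Char) (c : Char) :
    PySem.Chars.find l [c] =
      (((List.range l.length).filter (fun j => l[j]? == some c)).head?).elim (-1) (fun j => (j : Int)) := by
  show PySem.Chars.find.go [c] l 0 = _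
  rw [fgo_char]
  cases hh : ((List.range l.length).filter (fun j => l[j]? == some c)).head? <;> simp

theorem step_back (l : List Char) (x : Int) (h0 : 0 ≤ x) (hn : x ≤ l.length) :
    max 0 (PySem.Chars.rfindFrom l ['\n'] 0 (some x)) =
      (((pvNl l).filter (fun (j : Nat) => decide ((j : Int) < x))).getLast?).elim 0 (fun j => (j : Int)) := by
  simp only [PySem.Chars.rfindFrom]
  have h1 : ¬ ((l.length : Int) < x) := by omega
  have h2 : ¬ (x < (0:Int)) := by omega
  simp only [h1, if_false, h2, if_neg, lt_irrefl, Int.toNat_zero, List.drop_zero, ite_false]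
  have hmn : x.toNat ≤ l.length := by omega
  rw [rfind_char]
  have hlen : (l.take x.toNat).length = x.toNat := by simp [hmn]
  rw [hlen]
  have hfe : (List.range x.toNat).filter (fun j => (l.take x.toNat)[j]? == some '\n')
      = (pvNl l).filter (fun (j : Nat) => decide ((j : Int) < x)) := by
    rw [List.filter_congr (q := fun j => l[j]? == some '\n')
      (fun a ha => by
        have : a < x.toNat := List.mem_range.mp ha
        simp [List.getElem?_take, this])]
    unfold pvNl
    rw [List.filter_comm]
    congr 1
    rw [← range_filter_lt l.length x.toNat hmn]
    apply List.filter_congr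
    intro a _
    simp only [decide_eq_decide]
    omega
  rw [hfe]
  cases hh : ((pvNl l).filter (fun (j : Nat) => decide ((j : Int) < x))).getLast? with
  | none => simp
  | some v => simp

theorem step_fwd (l : List Char) (e : Int) (he : 0 ≤ e) :
    PySem.Chars.findFrom l ['\n'] (e + 1) none =
      (((pvNl l).filter (fun (j : Nat) => decide (e < (j : Int)))).head?).elim (-1) (fun j => (j : Int)) := by
  simp only [PySem.Chars.findFrom]
  have h2 : ¬ (e + 1 < (0:Int)) := by omega
  simp only [h2, ite_false, if_false]
  by_cases hbig : (l.length : Int) < e + 1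
  · have hemp : ((pvNl l).filter (fun (j : Nat) => decide (e < (j : Int)))) = [] := by
      rw [List.filter_eq_nil_iff]
      intro a ha
      have haR : a ∈ List.range l.length := List.mem_of_mem_filter ha
      have : a < l.length := List.mem_range.mp haR
      simp only [decide_eq_true_eq, not_lt]
      omega
    rw [if_pos hbig, hemp]
    rfl
  · rw [if_neg hbig]
    simp only [Int.toNat_natCast, List.take_length]
    have hd : (e + 1).toNat ≤ l.length := by omega
    rw [find_char]
    have hlen : (l.drop (e+1).toNat).length = l.length - (e+1).toNat := by simp
    rw [hlen]
    have hfe : (List.range (l.length - (e+1).toNat)).filter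
        (fun j => (l.drop (e+1).toNat)[j]? == some '\n')
        = ((pvNl l).filter (fun (j : Nat) => decide (e < (j : Int)))).map (fun j => j - (e+1).toNat) := by
      have hq : ((pvNl l).filter (fun (j : Nat) => decide (e < (j : Int))))
          = ((List.range (l.length - (e+1).toNat)).map (fun j => (e+1).toNat + j)).filter
              (fun j => l[j]? == some '\n') := by
        unfold pvNl
        rw [← range_filter_ge l.length (e+1).toNat hd, ← List.filter_comm]
        congr 1
        apply List.filter_congr
        intro a _
        simp only [decide_eq_decide]
        omega
      rw [hq, List.filter_map, List.map_map]
      have hcomp : ((fun j => l[j]? == some '\n') ∘ (fun j => (e+1).toNat + j))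
          = (fun j => (l.drop (e+1).toNat)[j]? == some '\n') := by
        funext j; simp [List.getElem?_drop]
      rw [hcomp]
      have hid : ((fun (j : Nat) => j - (e+1).toNat) ∘ (fun j => (e+1).toNat + j)) = id := by
        funext j; simp
      rw [hid, List.map_id]
    rw [hfe, List.head?_map]
    cases hh : ((pvNl l).filter (fun (j : Nat) => decide (e < (j : Int)))).head? with
    | none => rfl
    | some v =>
      have hv : v ∈ (pvNl l).filter (fun (j : Nat) => decide (e < (j : Int))) := by
        exact List.mem_of_mem_head? (by rw [hh]; rfl)
      have hve : e < (v : Int) := by simpa using (List.of_mem_filter hv)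
      have hge : (e+1).toNat ≤ v := by omega
      simp only [Option.map_some, Option.elim]
      have : ¬ (((v - (e+1).toNat : Nat) : Int) = -1) := by omega
      rw [if_neg this]
      omega

theorem pvNl_pairwise (l : List Char) : (pvNl l).Pairwise (· < ·) :=
  (List.pairwise_lt_range).filter _

theorem pvNl_mem_lt (l : List Char) (j : Nat) (hj : j ∈ pvNl l) : j < l.length :=
  List.mem_range.mp (List.mem_of_mem_filter hj)

theorem sorted_filter_lt' (l : List Nat) (hl : l.Pairwise (· < ·)) (t : Nat) (ht : t < l.length)
    (v : Nat) (hv : l[t] = v) : l.filter (fun x => decide (x < v)) = l.take t := by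
  subst hv; exact sorted_filter_lt l hl t ht

theorem sorted_filter_gt' (l : List Nat) (hl : l.Pairwise (· < ·)) (t : Nat) (ht : t < l.length)
    (v : Nat) (hv : l[t] = v) : l.filter (fun x => decide (v < x)) = l.drop (t + 1) := by
  subst hv; exact sorted_filter_gt l hl t ht

def pvGit (l : List Char) (k : Nat) (x : Int) : Int :=
  (fun y => max 0 (PySem.Chars.rfindFrom l ['\n'] 0 (some y)))^[k] x

theorem back_iter (l : List Char) (i : Int) (h0 : 0 ≤ i) (hn : i ≤ l.length) (k : Nat) (hk : 1 ≤ k) :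
    pvGit l k i =
      (if k ≤ ((pvNl l).filter (fun (j : Nat) => decide ((j : Int) < i))).length
       then ((((pvNl l).filter (fun (j : Nat) => decide ((j : Int) < i))).getD
          (((pvNl l).filter (fun (j : Nat) => decide ((j : Int) < i))).length - k) 0 : Nat) : Int)
       else 0) := by
  set bl := (pvNl l).filter (fun (j : Nat) => decide ((j : Int) < i)) with hbl
  have hblsort : bl.Pairwise (· < ·) := (pvNl_pairwise l).filter _
  have hblmem : ∀ j ∈ bl, j ∈ pvNl l := fun j hj => List.mem_of_mem_filter hj
  induction k with
  | zero => omega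
  | succ k ih =>
    cases Nat.eq_or_lt_of_le hk with
    | inl h1 =>
      have hk0 : k = 0 := by omega
      subst hk0
      show max 0 (PySem.Chars.rfindFrom l ['\n'] 0 (some i)) = _
      rw [step_back l i h0 hn, ← hbl]
      rw [List.getLast?_eq_getElem?]
      by_cases h1le : 1 ≤ bl.length
      · have hlt : bl.length - 1 < bl.length := by omega
        rw [List.getElem?_eq_getElem hlt]
        rw [if_pos h1le, List.getD_eq_getElem bl 0 hlt]
        rfl
      · have hbl0 : bl = [] := List.eq_nil_of_length_eq_zero (by omega)
        simp [hbl0]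
    | inr h2 =>
      have hk1 : 1 ≤ k := by omega
      have hstep : pvGit l (k+1) i = max 0 (PySem.Chars.rfindFrom l ['\n'] 0 (some (pvGit l k i))) := by
        unfold pvGit
        rw [Function.iterate_succ_apply']
      rw [hstep, ih hk1]
      by_cases hkm : k ≤ bl.length
      · rw [if_pos hkm]
        have htlt : bl.length - k < bl.length := by omega
        obtain ⟨v, hv⟩ : ∃ v : Nat, bl[bl.length - k] = v := ⟨_, rfl⟩
        rw [List.getD_eq_getElem bl 0 htlt]
        simp only [hv]
        have hmem : v ∈ bl := hv ▸ List.getElem_mem _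
        have hval : (v : Int) < i := by simpa using List.of_mem_filter hmem
        have hnn : (0:Int) ≤ (v : Int) := by positivity
        have hle : (v : Int) ≤ l.length := by
          have := pvNl_mem_lt l _ (hblmem _ hmem)
          omega
        rw [step_back l _ hnn hle]
        have hW : (pvNl l).filter (fun (j : Nat) => decide ((j : Int) < (v : Int)))
            = bl.take (bl.length - k) := by
          have hsub : (pvNl l).filter (fun (j : Nat) => decide ((j : Int) < (v : Int)))
              = bl.filter (fun (j : Nat) => decide (j < v)) := by
            rw [hbl, List.filter_filter]
            apply List.filter_congr
            intro a _
            by_cases hab : a < v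
            · have : (a : Int) < i := by omega
              simp [hab, this]
            · have : ¬ ((a : Int) < (v : Int)) := by omega
              simp [hab, this]
          rw [hsub]
          exact sorted_filter_lt' bl hblsort _ htlt v hv
        rw [hW]
        by_cases hklt : k < bl.length
        · have ht1 : 1 ≤ bl.length - k := by omega
          have hlen : (bl.take (bl.length - k)).length = bl.length - k := by
            rw [List.length_take]; omega
          have hlt2 : bl.length - k - 1 < bl.length := by omega
          have hgl : (bl.take (bl.length - k)).getLast? = some (bl[bl.length - k - 1]'hlt2) := by
            rw [List.getLast?_eq_getElem?, hlen]
            rw [List.getElem?_take]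
            rw [if_pos (by omega)]
            exact List.getElem?_eq_getElem hlt2
          rw [hgl, if_pos (by omega : k + 1 ≤ bl.length)]
          rw [List.getD_eq_getElem bl 0 (by omega : bl.length - (k+1) < bl.length)]
          simp only [Option.elim]
          congr 2
        · have hkeq : k = bl.length := by omega
          have ht0 : bl.length - k = 0 := by omega
          rw [ht0]
          simp only [List.take_zero, List.getLast?_nil]
          rw [if_neg (by omega)]
          rfl
      · rw [if_neg hkm, if_neg (by omega)]
        rw [step_back l 0 (le_refl 0) (by positivity)]
        have : (pvNl l).filter (fun (j : Nat) => decide ((j : Int) < (0:Int))) = [] := by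
          rw [List.filter_eq_nil_iff]
          intro a _
          simp
        rw [this]
        rfl

theorem fwd_loop (fc : String) (af : List Nat) (hsort : af.Pairwise (· < ·)) :
    ∀ (k t : Nat) (e : Int), 0 ≤ e →
      ((pvNl fc.toList).filter (fun (j : Nat) => decide (e < (j : Int)))) = af.drop t →
      pvAFindEnd fc e k =
        (if k = 0 then e
         else if t + k ≤ af.length then ((af.getD (t + k - 1) 0 : Nat) : Int)
         else (fc.toList.length : Int)) := by
  intro k
  induction k with
  | zero => intro t e _ _; simp [pvAFindEnd]
  | succ k ih =>
    intro t e he hinv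
    show (if PySem.Str.findFrom fc "\n" (e + 1) none = -1 then PySem.Str.len fc
          else pvAFindEnd fc (PySem.Str.findFrom fc "\n" (e + 1) none) k) = _
    rw [PySem.Str.findFrom_eq]
    rw [show ("\n" : String).toList = ['\n'] from rfl]
    rw [step_fwd fc.toList e he, hinv]
    cases hdrop : af.drop t with
    | nil =>
      simp only [List.head?_nil, Option.elim_none, if_true]
      have hlen : af.length ≤ t := List.drop_eq_nil_iff.mp hdrop
      rw [if_neg (by omega), if_neg (by omega)]
      exact PySem.Str.len_eq fc
    | cons a rest =>
      simp only [List.head?_cons, Option.elim_some]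
      have hne : ¬ ((a : Int) = -1) := by omega
      rw [if_neg hne]
      have htlt : t < af.length := by
        by_contra hcon
        rw [List.drop_eq_nil_iff.mpr (by omega)] at hdrop
        simp at hdrop
      have hat : af[t]'htlt = a := by
        have h1 : (af.drop t).head? = af[t]? := List.head?_drop
        rw [hdrop] at h1
        have := h1.symm
        simp only [List.head?_cons] at this
        rw [List.getElem?_eq_getElem htlt] at this
        exact (Option.some.injEq _ _).mp this
      have hsort' : (af.drop t).Pairwise (· < ·) := hsort.drop
      have hinv' : ((pvNl fc.toList).filter (fun (j : Nat) => decide ((a : Int) < (j : Int))))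
          = af.drop (t + 1) := by
        have hamem : a ∈ af.drop t := by rw [hdrop]; exact List.mem_cons_self
        have hae : e < (a : Int) := by
          have : a ∈ (pvNl fc.toList).filter (fun (j : Nat) => decide (e < (j : Int))) := by
            rw [hinv]; exact hamem
          simpa using List.of_mem_filter this
        have h1 : ((pvNl fc.toList).filter (fun (j : Nat) => decide ((a : Int) < (j : Int))))
            = ((pvNl fc.toList).filter (fun (j : Nat) => decide (e < (j : Int)))).filter
                (fun (j : Nat) => decide (a < j)) := by
          rw [List.filter_filter]
          apply List.filter_congr
          intro b _
          by_cases hab : a < b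
          · have h2 : e < (b : Int) := by omega
            have h3 : (a : Int) < (b : Int) := by omega
            simp [hab, h2, h3]
          · have h3 : ¬ ((a : Int) < (b : Int)) := by omega
            simp [hab, h3]
        rw [h1, hinv, hdrop]
        have h4 : (a :: rest).filter (fun (x : Nat) => decide (a < x)) = (a :: rest).drop 1 := by
          have hs : (a :: rest).Pairwise (· < ·) := hdrop ▸ hsort'
          exact sorted_filter_gt' (a :: rest) hs 0 (by simp) a rfl
        rw [h4]
        show rest = af.drop (t + 1)
        have : af.drop (t + 1) = (af.drop t).drop 1 := by
          rw [List.drop_drop]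
        rw [this, hdrop]
        rfl
      rw [ih (t+1) (a : Int) (by positivity) hinv']
      cases k with
      | zero =>
        rw [if_pos rfl, if_neg (by omega), if_pos (by omega)]
        rw [List.getD_eq_getElem af 0 (by omega : t + 1 - 1 < af.length)]
        simp only [Nat.add_sub_cancel]
        rw [hat]
      | succ k' =>
        rw [if_neg (Nat.succ_ne_zero k')]
        by_cases hc : t + 1 + (k' + 1) ≤ af.length
        · rw [if_pos hc, if_neg (Nat.succ_ne_zero (k'+1)), if_pos (by omega)]
          congr 2
          omega
        · rw [if_neg hc, if_neg (Nat.succ_ne_zero (k'+1)), if_neg (by omega)]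

theorem newlines_eq (l : List Char) :
    ((PySem.List.enumerate l 0).filter (fun p => p.2 == '\n')).map (fun p => p.1)
      = (pvNl l).map (fun (j : Nat) => (j : Int)) := by
  rw [enum_bridge l 0]
  unfold pvNl
  apply List.map_congr_left
  intro a _
  omega

theorem pyGet?_map_neg6 (xs : List Nat) (h : 6 ≤ xs.length) :
    PySem.List.pyGet? (xs.map (fun (j : Nat) => (j : Int))) (-6)
      = some ((xs[xs.length - 6]'(by omega) : Nat) : Int) := by
  have h1 : ¬ ((0:Int) ≤ -6) := by omega
  have h2 : -((xs.map (fun (j : Nat) => (j : Int))).length : Int) ≤ -6 := by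
    rw [List.length_map]; omega
  simp only [PySem.List.pyGet?, PySem.List.pyIdx?, List.length_map, h1, if_false,
    if_pos (by omega : -((xs.length : Int)) ≤ -6)]
  simp only [Option.bind_some, Option.bind]
  rw [List.getElem?_map]
  rw [List.getElem?_eq_getElem (by omega : xs.length - ((-(-6:Int)).toNat) < xs.length)]
  rfl

theorem pyGet?_map_11 (xs : List Nat) (h : 12 ≤ xs.length) :
    PySem.List.pyGet? (xs.map (fun (j : Nat) => (j : Int))) 11
      = some ((xs[11]'(by omega) : Nat) : Int) := by
  have h1 : (0:Int) ≤ 11 := by omega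
  have h2 : (11:Int) < ((xs.map (fun (j : Nat) => (j : Int))).length : Int) := by
    rw [List.length_map]; omega
  simp only [PySem.List.pyGet?, PySem.List.pyIdx?, List.length_map, h1, if_true,
    if_pos (by omega : (11:Int) < ((xs.length : Int)))]
  simp only [Option.bind]
  rw [List.getElem?_map]
  rw [List.getElem?_eq_getElem (by omega : ((11:Int)).toNat < xs.length)]
  rfl

theorem main_equiv (fc bm : String) :
    get_surrounding_lines fc bm = get_surrounding_lines_alt fc bm := by
  by_cases hf : PySem.Str.find fc bm = -1
  · simp only [get_surrounding_lines, get_surrounding_lines_alt, hf]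
    simp
  · have hneg1 : -1 ≤ PySem.Str.find fc bm := by
      rw [PySem.Str.find_eq]; exact PySem.Chars.neg_one_le_find _ _
    have h0 : 0 ≤ PySem.Str.find fc bm := by omega
    have hn : PySem.Str.find fc bm ≤ fc.toList.length := by
      rw [PySem.Str.find_eq]; exact PySem.Chars.find_le_length _ _
    have h0' : 0 ≤ PySem.Chars.find fc.toList bm.toList := by rwa [PySem.Str.find_eq] at h0
    have hpre : bm.toList <+: fc.toList.drop (PySem.Chars.find fc.toList bm.toList).toNat :=
      (PySem.Chars.find_spec h0').1
    have hstart : PySem.Str.find fc bm + PySem.Str.len bm ≤ fc.toList.length := by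
      have hl := hpre.length_le
      rw [List.length_drop] at hl
      rw [PySem.Str.find_eq, PySem.Str.len_eq]
      rw [PySem.Str.find_eq] at h0 hn
      omega
    simp only [get_surrounding_lines, get_surrounding_lines_alt, if_pos hf, if_neg hf,
      ne_eq, not_false_eq_true, if_true]
    set i := PySem.Str.find fc bm with hi
    -- backward boundary
    have hback : (PySem.List.pyRange 0 5 1).foldl
        (fun acc _ => max 0 (PySem.Str.rfindFrom fc "\n" 0 (some acc)))
        (max 0 (PySem.Str.rfindFrom fc "\n" 0 (some i))) = pvGit fc.toList 6 i := rfl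
    have hlen0 : (0:Int) ≤ PySem.Str.len bm := by rw [PySem.Str.len_eq]; positivity
    have hstart0 : (0:Int) ≤ i + PySem.Str.len bm := by omega
    have hbit := back_iter fc.toList i h0 hn 6 (by omega)
    have hnewl := newlines_eq fc.toList
    have hbefore : (((pvNl fc.toList).map (fun (j : Nat) => (j : Int))).filter
        (fun k => decide (k < i)))
        = ((pvNl fc.toList).filter (fun (j : Nat) => decide ((j : Int) < i))).map
            (fun (j : Nat) => (j : Int)) := by
      rw [List.filter_map]; rfl
    have hafter : (((pvNl fc.toList).map (fun (j : Nat) => (j : Int))).filter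
        (fun k => decide (i + PySem.Str.len bm < k)))
        = ((pvNl fc.toList).filter (fun (j : Nat) => decide (i + PySem.Str.len bm < (j : Int)))).map
            (fun (j : Nat) => (j : Int)) := by
      rw [List.filter_map]; rfl
    have haf := fwd_loop fc ((pvNl fc.toList).filter
        (fun (j : Nat) => decide (i + PySem.Str.len bm < (j : Int))))
        ((pvNl_pairwise fc.toList).filter _) 12 0 (i + PySem.Str.len bm) hstart0 rfl
    rw [hback, hbit, hnewl, hbefore, hafter, haf]
    set bl := (pvNl fc.toList).filter (fun (j : Nat) => decide ((j : Int) < i)) with hbl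
    set af := (pvNl fc.toList).filter
        (fun (j : Nat) => decide (i + PySem.Str.len bm < (j : Int))) with haf2
    rw [List.length_map, List.length_map]
    have hbegin : (if 6 ≤ bl.length then ((bl.getD (bl.length - 6) 0 : Nat) : Int) else 0)
        = (if 6 ≤ bl.length then
            (match PySem.List.pyGet? (bl.map (fun (j : Nat) => (j : Int))) (-6) with
              | some v => v | none => 0) else 0) := by
      by_cases h6 : 6 ≤ bl.length
      · rw [if_pos h6, if_pos h6, pyGet?_map_neg6 bl h6,
          List.getD_eq_getElem bl 0 (by omega : bl.length - 6 < bl.length)]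
      · rw [if_neg h6, if_neg h6]
    have hend : (if (0:Nat) + 12 ≤ af.length then ((af.getD ((0:Nat) + 12 - 1) 0 : Nat) : Int)
          else (fc.toList.length : Int))
        = (if 12 ≤ af.length then
            (match PySem.List.pyGet? (af.map (fun (j : Nat) => (j : Int))) (11 : Int) with
              | some v => v | none => 0)
           else PySem.Str.len fc) := by
      by_cases h12 : 12 ≤ af.length
      · rw [if_pos (by omega : (0:Nat) + 12 ≤ af.length), if_pos h12, pyGet?_map_11 af h12,
          List.getD_eq_getElem af 0 (by omega : (0:Nat) + 12 - 1 < af.length)]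
      · rw [if_neg (by omega : ¬ ((0:Nat) + 12 ≤ af.length)), if_neg h12, PySem.Str.len_eq]
    rw [show (if 12 = 0 then (i + PySem.Str.len bm) else if (0:Nat) + 12 ≤ af.length
          then ((af.getD ((0:Nat) + 12 - 1) 0 : Nat) : Int) else (fc.toList.length : Int))
        = (if (0:Nat) + 12 ≤ af.length then ((af.getD ((0:Nat) + 12 - 1) 0 : Nat) : Int)
          else (fc.toList.length : Int)) from by rw [if_neg (by omega)]]
    rw [hbegin, hend]

-- ===== VERDICT (by name: the statement is the Claim_ definition above) =====
theorem get_surrounding_lines_spec : Claim_equal_get_surrounding_lines := by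
  intro fc bm _
  unfold Spec_get_surrounding_lines
  exact main_equiv fc bm
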